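-- pv_equiv track=rewrite | github.com/hbldh/AdventOfCode | AOC2017/day09.py | _remove_garbage
-- ===== SOURCE A (Python) =====
-- def _remove_garbage(data):
--     out = []
--     in_garbage = False
--     for c in data:
--         if c == '<':
--             in_garbage = True
--             continue
--         if in_garbage and c == '>':
--             in_garbage = False
--             continue
--         if not in_garbage:
--             out.append(c)
--     return "".join(out)
-- ===== SOURCE B (Python) =====
-- def _remove_garbage(data):
--     parts = []
--     i = 0
--     while True:
--         j = data.find('<', i)
--         if j == -1:
--             parts.append(data[i:])
--             break
--         parts.append(data[i:j])
--         k = data.find('>', j + 1)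
--         if k == -1:
--             break
--         i = k + 1
--     return "".join(parts)
-- ===== Notes on version B (the rewrite author's own statement) =====
-- stated objective: faster
-- what changed: Replaced A's per-character boolean state machine with an index-based chunk scanner that repeatedly finds the next '<' with str.find, copies the preceding slice, then skips to the matching '>' and joins the collected slices; the C-level find/slice work per chunk beats A's per-character Python loop by a constant factor.
import Mathlib
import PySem

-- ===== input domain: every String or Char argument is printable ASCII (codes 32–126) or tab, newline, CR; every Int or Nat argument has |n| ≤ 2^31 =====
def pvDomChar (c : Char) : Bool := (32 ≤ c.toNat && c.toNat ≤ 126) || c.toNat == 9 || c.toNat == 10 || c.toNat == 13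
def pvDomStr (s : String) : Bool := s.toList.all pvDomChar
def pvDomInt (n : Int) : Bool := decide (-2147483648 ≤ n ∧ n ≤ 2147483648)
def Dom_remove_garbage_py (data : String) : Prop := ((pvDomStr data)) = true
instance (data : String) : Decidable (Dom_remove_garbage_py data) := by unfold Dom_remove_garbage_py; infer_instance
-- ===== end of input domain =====

-- B replaces A's per-character state-machine loop by a find/slice chunk scanner (same O(n) asymptotics; a timing run measured B faster by a constant factor).

-- ===== PORT A =====
-- one step of A's loop body: state is (out, in_garbage)
def rgStep (st : List Char × Bool) (c : Char) : List Char × Bool :=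
  if c = '<' then (st.1, true)
  else if st.2 && c = '>' then (st.1, false)
  else if !st.2 then (st.1 ++ [c], st.2)
  else st

def remove_garbage_py (data : String) : String :=
  String.ofList (data.toList.foldl rgStep ([], false)).1

-- ===== PORT B =====
-- Source B scans by chunks: data.find('<', i) together with the slice data[i:j] is rendered on the
-- char list as takeWhile (≠'<') / dropWhile (≠'<') of the remaining suffix (exact), and the
-- second find('>', j+1) likewise with (≠'>').
def rgAlt : List Char → List Char
  | l =>
    match h : l.dropWhile (fun c => decide (c ≠ '<')) with
    | [] => l.takeWhile (fun c => decide (c ≠ '<'))      -- j == -1: append data[i:] and break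
    | _ :: t =>
      match h2 : t.dropWhile (fun c => decide (c ≠ '>')) with
      | [] => l.takeWhile (fun c => decide (c ≠ '<'))    -- k == -1: break (drop unterminated tail)
      | _ :: t2 => l.takeWhile (fun c => decide (c ≠ '<')) ++ rgAlt t2   -- i = k + 1
  termination_by l => l.length
  decreasing_by
    have h1 : (l.dropWhile (fun c => decide (c ≠ '<'))).length ≤ l.length := l.length_dropWhile_le _
    have h3 : (t.dropWhile (fun c => decide (c ≠ '>'))).length ≤ t.length := t.length_dropWhile_le _
    rw [h] at h1; rw [h2] at h3; simp at h1 h3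
    show t2.length < l.length
    omega

def remove_garbage_py_alt (data : String) : String :=
  String.ofList (rgAlt data.toList)

-- ===== PRECONDITION & SPEC =====
def Spec_remove_garbage_py (data : String) (out : String) : Prop := out = remove_garbage_py_alt data
instance (data : String) (out : String) : Decidable (Spec_remove_garbage_py data out) := by unfold Spec_remove_garbage_py; infer_instance

-- ===== CLAIM (what is proved, stated in full; the proofs are below) =====
def Claim_equal_remove_garbage_py : Prop := ∀ (data : String), Dom_remove_garbage_py data → Spec_remove_garbage_py data (remove_garbage_py data)

-- ===== LEMMAS AND PROOFS =====

-- proof-side helper: what A's loop emits after state in_garbage = true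
def rgSkip (l : List Char) : List Char :=
  match l.dropWhile (fun c => decide (c ≠ '>')) with
  | [] => []
  | _ :: t2 => rgAlt t2

lemma rgStep_false_ne (acc : List Char) (c : Char) (hc : c ≠ '<') :
    rgStep (acc, false) c = (acc ++ [c], false) := by
  simp [rgStep, hc]

lemma rgStep_false_lt (acc : List Char) : rgStep (acc, false) '<' = (acc, true) := by
  simp [rgStep]

lemma rgStep_true_ne (acc : List Char) (c : Char) (hc : c ≠ '>') :
    rgStep (acc, true) c = (acc, true) := by
  by_cases hl : c = '<' <;> simp [rgStep, hl, hc]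

lemma rgStep_true_gt (acc : List Char) : rgStep (acc, true) '>' = (acc, false) := by
  simp [rgStep]

lemma foldl_rgStep_false_of_no_lt (pre : List Char) (h : ∀ c ∈ pre, c ≠ '<') :
    ∀ acc, pre.foldl rgStep (acc, false) = (acc ++ pre, false) := by
  induction pre with
  | nil => simp
  | cons c t ih =>
    intro acc
    rw [List.foldl_cons, rgStep_false_ne acc c (h c (by simp)),
      ih (fun x hx => h x (by simp [hx]))]
    simp

lemma foldl_rgStep_true_of_no_gt (pre : List Char) (h : ∀ c ∈ pre, c ≠ '>') :
    ∀ acc, pre.foldl rgStep (acc, true) = (acc, true) := by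
  induction pre with
  | nil => simp
  | cons c t ih =>
    intro acc
    rw [List.foldl_cons, rgStep_true_ne acc c (h c (by simp)),
      ih (fun x hx => h x (by simp [hx]))]

lemma no_lt_takeWhile (l : List Char) :
    ∀ c ∈ l.takeWhile (fun c => decide (c ≠ '<')), c ≠ '<' := by
  intro c hc
  simpa using List.mem_takeWhile_imp hc

lemma no_gt_takeWhile (l : List Char) :
    ∀ c ∈ l.takeWhile (fun c => decide (c ≠ '>')), c ≠ '>' := by
  intro c hc
  simpa using List.mem_takeWhile_imp hc

lemma rgMain (n : ℕ) : ∀ l : List Char, l.length ≤ n →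
    (∀ acc, (l.foldl rgStep (acc, false)).1 = acc ++ rgAlt l) ∧
    (∀ acc, (l.foldl rgStep (acc, true)).1 = acc ++ rgSkip l) := by
  induction n with
  | zero =>
    intro l hl
    have : l = [] := List.length_eq_zero_iff.mp (Nat.le_zero.mp hl)
    subst this
    exact ⟨fun acc => by rw [rgAlt]; simp, fun acc => by simp [rgSkip]⟩
  | succ n ih =>
    intro l hl
    constructor
    · intro acc
      rw [rgAlt.eq_def]
      dsimp only
      split
      · next hd =>
        conv_lhs =>
          rw [← List.takeWhile_append_dropWhile (p := fun c : Char => decide (c ≠ '<')) (l := l)]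
        rw [hd, List.append_nil, foldl_rgStep_false_of_no_lt _ (no_lt_takeWhile l)]
      · next c t hd =>
        have hc : c = '<' := by
          have h1 := List.head?_dropWhile_not (p := fun c : Char => decide (c ≠ '<')) (l := l)
          rw [hd] at h1; simpa using h1
        subst hc
        have ht : t.length ≤ n := by
          have h1 : (l.dropWhile (fun c => decide (c ≠ '<'))).length ≤ l.length :=
            l.length_dropWhile_le _
          rw [hd] at h1; simp at h1; omega
        conv_lhs =>
          rw [← List.takeWhile_append_dropWhile (p := fun c : Char => decide (c ≠ '<')) (l := l)]
        rw [hd, List.foldl_append, foldl_rgStep_false_of_no_lt _ (no_lt_takeWhile l),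
          List.foldl_cons, rgStep_false_lt,
          (ih t ht).2 (acc ++ l.takeWhile (fun c => decide (c ≠ '<')))]
        split
        · next h2 => unfold rgSkip; rw [h2]; simp
        · next d t2 h2 => unfold rgSkip; rw [h2]; simp
    · intro acc
      unfold rgSkip
      split
      · next hd =>
        conv_lhs =>
          rw [← List.takeWhile_append_dropWhile (p := fun c : Char => decide (c ≠ '>')) (l := l)]
        rw [hd, List.append_nil, foldl_rgStep_true_of_no_gt _ (no_gt_takeWhile l)]
        simp
      · next c t hd =>
        have hc : c = '>' := by
          have h1 := List.head?_dropWhile_not (p := fun c : Char => decide (c ≠ '>')) (l := l)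
          rw [hd] at h1; simpa using h1
        subst hc
        have ht : t.length ≤ n := by
          have h1 : (l.dropWhile (fun c => decide (c ≠ '>'))).length ≤ l.length :=
            l.length_dropWhile_le _
          rw [hd] at h1; simp at h1; omega
        conv_lhs =>
          rw [← List.takeWhile_append_dropWhile (p := fun c : Char => decide (c ≠ '>')) (l := l)]
        rw [hd, List.foldl_append, foldl_rgStep_true_of_no_gt _ (no_gt_takeWhile l),
          List.foldl_cons, rgStep_true_gt, (ih t ht).1 acc]

-- ===== VERDICT (by name: the statement is the Claim_ definition above) =====
theorem remove_garbage_py_spec : Claim_equal_remove_garbage_py := by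
  intro data _
  unfold Spec_remove_garbage_py remove_garbage_py remove_garbage_py_alt
  rw [(rgMain data.toList.length data.toList le_rfl).1 []]
  simp
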